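-- pv_equiv track=rewrite | github.com/VladislavErekeshov/Number-convertor-by-django | main/models.py | abcerror
-- ===== SOURCE A (Python) =====
-- def abcerror(number, arr1):
--     lg = 0
--     for i in arr1:
--         for l in number:
--             if i == l:
--                 lg = lg + 1
--     if lg < len(number):
--         return 1
--     else:
--         return 0
-- ===== SOURCE B (Python) =====
-- def abcerror(number, arr1):
--     xs = sorted(arr1)
--     ys = sorted(number)
--     lg = 0
--     i = j = 0
--     n, m = len(xs), len(ys)
--     while i < n and j < m:
--         if xs[i] < ys[j]:
--             i += 1
--         elif ys[j] < xs[i]: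
--             j += 1
--         else:
--             v = xs[i]
--             i0, j0 = i, j
--             while i < n and xs[i] == v:
--                 i += 1
--             while j < m and ys[j] == v:
--                 j += 1
--             lg += (i - i0) * (j - j0)
--     return 1 if lg < len(number) else 0
-- ===== Notes on version B (the rewrite author's own statement) =====
-- stated objective: faster
-- what changed: Sorts arr1 and number's characters once, then a two-pointer merge over equal-value runs adds run-length products, replacing A's nested arr1-by-number pairwise scan.
import Mathlib
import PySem

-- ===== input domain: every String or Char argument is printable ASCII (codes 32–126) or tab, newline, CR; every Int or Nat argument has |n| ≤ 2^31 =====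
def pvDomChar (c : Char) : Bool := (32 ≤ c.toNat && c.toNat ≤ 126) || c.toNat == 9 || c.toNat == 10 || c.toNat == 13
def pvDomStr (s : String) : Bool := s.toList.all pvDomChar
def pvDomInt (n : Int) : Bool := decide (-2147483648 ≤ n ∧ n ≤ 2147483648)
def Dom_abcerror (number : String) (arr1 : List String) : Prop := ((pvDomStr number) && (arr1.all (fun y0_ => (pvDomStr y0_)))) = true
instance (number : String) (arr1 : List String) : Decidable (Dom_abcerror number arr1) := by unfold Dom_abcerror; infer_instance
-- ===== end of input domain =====

-- B sorts arr1 and number's characters and computes the match count by a two-pointer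
-- merge over run lengths instead of A's nested pairwise scan (objective: alternative).

-- ===== PORT A =====
def abcerror (number : String) (arr1 : List String) : Int :=
  let lg : Int :=
    arr1.foldl
      (fun lg i =>
        number.toList.foldl (fun lg l => if i == String.ofList [l] then lg + 1 else lg) lg)
      0
  if lg < PySem.Str.len number then 1 else 0

-- ===== PORT B =====
-- the two-pointer run-merge loop of Source B: at each step either advance the side with
-- the smaller head, or consume the whole equal run on both sides and add run1*run2
def mergeRuns (xs ys : List String) : Int :=
  match xs, ys with
  | [], _ => 0
  | _ :: _, [] => 0
  | x :: xt, y :: yt =>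
    if x < y then mergeRuns xt (y :: yt)
    else if y < x then mergeRuns (x :: xt) yt
    else
      (((x :: xt).takeWhile (· == x)).length : Int) * (((y :: yt).takeWhile (· == y)).length : Int)
        + mergeRuns ((x :: xt).dropWhile (· == x)) ((y :: yt).dropWhile (· == y))
termination_by xs.length + ys.length
decreasing_by
  · simp
  · simp
  · simp only [List.dropWhile_cons, beq_self_eq_true, if_true]
    have h1 := List.length_dropWhile_le (· == x) xt
    have h2 := List.length_dropWhile_le (· == y) yt
    simp at *; omega

def abcerror_alt (number : String) (arr1 : List String) : Int :=
  let xs := PySem.List.sorted arr1 (fun s => s) false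
  let ys := PySem.List.sorted (number.toList.map (fun c => String.ofList [c])) (fun s => s) false
  let lg := mergeRuns xs ys
  if lg < PySem.Str.len number then 1 else 0

-- ===== PRECONDITION & SPEC =====
def Spec_abcerror (number : String) (arr1 : List String) (out : Int) : Prop := out = abcerror_alt number arr1
instance (number : String) (arr1 : List String) (out : Int) : Decidable (Spec_abcerror number arr1 out) := by unfold Spec_abcerror; infer_instance

-- ===== CLAIM (what is proved, stated in full; the proofs are below) =====
def Claim_equal_abcerror : Prop := ∀ (number : String) (arr1 : List String), Dom_abcerror number arr1 → Spec_abcerror number arr1 (abcerror number arr1)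

-- ===== LEMMAS AND PROOFS =====

-- A's inner loop over number's chars adds the count of i among the one-char strings
theorem inner_eq_count (cs : List Char) (i : String) (acc : Int) :
    cs.foldl (fun lg l => if i == String.ofList [l] then lg + 1 else lg) acc
      = acc + ((cs.map (fun c => String.ofList [c])).count i : Int) := by
  induction cs generalizing acc with
  | nil => simp
  | cons c cs ih =>
    simp only [List.foldl_cons, List.map_cons, ih]
    by_cases h : i = String.ofList [c]
    · simp [h]; ring
    · have h' : ¬ (String.ofList [c] = i) := fun e => h e.symm
      simp [h, h']

-- A's double loop is the sum over arr1 of the counts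
theorem a_loop_eq_sum (cs : List Char) (arr : List String) (acc : Int) :
    arr.foldl
      (fun lg i => cs.foldl (fun lg l => if i == String.ofList [l] then lg + 1 else lg) lg) acc
      = acc + (arr.map (fun s => ((cs.map (fun c => String.ofList [c])).count s : Int))).sum := by
  induction arr generalizing acc with
  | nil => simp
  | cons s arr ih =>
    simp only [List.foldl_cons]
    rw [inner_eq_count, ih]
    simp [List.map_cons]
    ring

-- in a sorted list headed by x, everything past the leading run of x is > x
theorem dropWhile_gt (x : String) (l : List String) (h : (x :: l).Pairwise (· ≤ ·)) :
    ∀ s ∈ (x :: l).dropWhile (· == x), x < s := by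
  induction l with
  | nil => simp
  | cons z rest ih =>
    intro s hs
    rcases List.pairwise_cons.mp h with ⟨h1, h2⟩
    by_cases hz : z = x
    · subst hz
      have h' : (z :: rest).Pairwise (· ≤ ·) := by
        refine List.pairwise_cons.mpr ⟨fun a ha => h1 a (List.mem_cons_of_mem _ ha),
          (List.pairwise_cons.mp h2).2⟩
      have hs' : s ∈ (z :: rest).dropWhile (· == z) := by
        simpa [List.dropWhile_cons] using hs
      exact ih h' s hs'
    · have hxz : x < z := lt_of_le_of_ne (h1 z (by simp)) (fun e => hz e.symm)
      have hs' : s ∈ z :: rest := by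
        have hrw : (x :: z :: rest).dropWhile (· == x) = z :: rest := by
          simp [hz]
        rw [hrw] at hs
        exact hs
      rcases List.mem_cons.mp hs' with rfl | hm
      · exact hxz
      · exact lt_of_lt_of_le hxz ((List.pairwise_cons.mp h2).1 s hm)

-- count of the head of a sorted list = length of its leading run
theorem count_head_sorted (x : String) (l : List String) (h : (x :: l).Pairwise (· ≤ ·)) :
    (x :: l).count x = ((x :: l).takeWhile (· == x)).length := by
  have hsplit := List.takeWhile_append_dropWhile (p := (· == x)) (l := x :: l)
  have hc : ((x :: l).dropWhile (· == x)).count x = 0 := by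
    rw [List.count_eq_zero]
    intro hmem
    exact absurd rfl (ne_of_gt (dropWhile_gt x l h x hmem))
  have ht : ((x :: l).takeWhile (· == x)).count x = ((x :: l).takeWhile (· == x)).length := by
    rw [List.count_eq_length]
    intro b hb
    have hb' : b = x := by simpa using List.mem_takeWhile_imp hb
    exact hb'.symm
  calc (x :: l).count x
      = (((x :: l).takeWhile (· == x)) ++ ((x :: l).dropWhile (· == x))).count x := by rw [hsplit]
    _ = _ := by rw [List.count_append, hc, ht]; ring

-- core: on sorted inputs the run-merge computes the sum of per-element counts
theorem mergeRuns_eq_sum (xs ys : List String)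
    (hx : xs.Pairwise (· ≤ ·)) (hy : ys.Pairwise (· ≤ ·)) :
    mergeRuns xs ys = (xs.map (fun s => (ys.count s : Int))).sum := by
  induction xs, ys using mergeRuns.induct with
  | case1 ys => simp [mergeRuns]
  | case2 x xt => simp [mergeRuns]
  | case3 x xt y yt hlt ih =>
    rw [mergeRuns]; simp only [hlt, if_true]
    have hx' : xt.Pairwise (· ≤ ·) := (List.pairwise_cons.mp hx).2
    rw [ih hx' hy]
    have hcx : (y :: yt).count x = 0 := by
      rw [List.count_eq_zero]
      intro hmem
      rcases List.mem_cons.mp hmem with rfl | hmem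
      · exact absurd hlt (lt_irrefl x)
      · have := (List.pairwise_cons.mp hy).1 x hmem
        exact absurd (lt_of_lt_of_le hlt this) (lt_irrefl x)
    simp [hcx]
  | case4 x xt y yt hnlt hlt ih =>
    rw [mergeRuns]; simp only [hnlt, hlt, if_true, if_false]
    have hy' : yt.Pairwise (· ≤ ·) := (List.pairwise_cons.mp hy).2
    rw [ih hx hy']
    congr 1
    apply List.map_congr_left
    intro s hs
    have hys : y < s := by
      rcases List.mem_cons.mp hs with rfl | hsm
      · exact hlt
      · exact lt_of_lt_of_le hlt ((List.pairwise_cons.mp hx).1 s hsm)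
    have hne : y ≠ s := ne_of_lt hys
    have : (y :: yt).count s = yt.count s := by
      rw [List.count_cons]
      simp [hne]
    rw [this]
  | case5 x xt y yt hnlt hnlt2 ih =>
    have hxy : x = y := le_antisymm (not_lt.mp hnlt2) (not_lt.mp hnlt)
    subst hxy
    rw [mergeRuns]; simp only [hnlt, if_false]
    set t1 := (x :: xt).takeWhile (· == x) with ht1
    set d1 := (x :: xt).dropWhile (· == x) with hd1
    set t2 := (x :: yt).takeWhile (· == x) with ht2
    set d2 := (x :: yt).dropWhile (· == x) with hd2
    have hsplit1 : t1 ++ d1 = x :: xt := List.takeWhile_append_dropWhile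
    have hsplit2 : t2 ++ d2 = x :: yt := List.takeWhile_append_dropWhile
    have hd1p : d1.Pairwise (· ≤ ·) := List.Pairwise.sublist (List.dropWhile_sublist _) hx
    have hd2p : d2.Pairwise (· ≤ ·) := List.Pairwise.sublist (List.dropWhile_sublist _) hy
    rw [ih hd1p hd2p]
    -- sum over x::xt splits into the run t1 (all = x) and the tail d1 (all > x)
    have hsum : ((x :: xt).map (fun s => ((x :: yt).count s : Int))).sum
        = (t1.map (fun s => ((x :: yt).count s : Int))).sum
          + (d1.map (fun s => ((x :: yt).count s : Int))).sum := by
      rw [← hsplit1, List.map_append, List.sum_append]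
    rw [hsum]
    have hrun : (t1.map (fun s => ((x :: yt).count s : Int))).sum
        = (t1.length : Int) * (t2.length : Int) := by
      have hall : ∀ s ∈ t1, ((x :: yt).count s : Int) = (t2.length : Int) := by
        intro s hsmem
        have hsx : s = x := by
          have := List.mem_takeWhile_imp hsmem; simpa using this
        subst hsx
        rw [count_head_sorted s yt hy]
      rw [List.map_congr_left hall]
      simp
    have htail : (d1.map (fun s => ((x :: yt).count s : Int))).sum
        = (d1.map (fun s => (d2.count s : Int))).sum := by
      apply congrArg
      apply List.map_congr_left
      intro s hsmem
      have hgt : x < s := dropWhile_gt x xt hx s hsmem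
      have : (x :: yt).count s = t2.count s + d2.count s := by
        rw [← hsplit2, List.count_append]
      rw [this]
      have ht2z : t2.count s = 0 := by
        rw [List.count_eq_zero]
        intro hm
        have hsx : s = x := by simpa using List.mem_takeWhile_imp hm
        rw [hsx] at hgt
        exact absurd hgt (lt_irrefl x)
      simp [ht2z]
    rw [hrun, htail]

-- the sum of counts is invariant under sorting both sides
theorem sum_counts_sorted (arr : List String) (L : List String) :
    ((PySem.List.sorted arr (fun s => s) false).map
        (fun s => ((PySem.List.sorted L (fun s => s) false).count s : Int))).sum
      = (arr.map (fun s => (L.count s : Int))).sum := by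
  have hperm : (PySem.List.sorted arr (fun s : String => s) false).Perm arr :=
    PySem.List.sorted_perm arr _ false
  have hLperm : (PySem.List.sorted L (fun s : String => s) false).Perm L :=
    PySem.List.sorted_perm L _ false
  have hfun : ∀ s, ((PySem.List.sorted L (fun s : String => s) false).count s : Int) = (L.count s : Int) := by
    intro s; rw [hLperm.count_eq]
  calc ((PySem.List.sorted arr (fun s : String => s) false).map
          (fun s => ((PySem.List.sorted L (fun s : String => s) false).count s : Int))).sum
      = ((PySem.List.sorted arr (fun s : String => s) false).map (fun s => (L.count s : Int))).sum := by
        apply congrArg; exact List.map_congr_left (fun s _ => hfun s)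
    _ = (arr.map (fun s => (L.count s : Int))).sum := (hperm.map _).sum_eq

-- ===== VERDICT (by name: the statement is the Claim_ definition above) =====
theorem abcerror_spec : Claim_equal_abcerror := by
  intro number arr1 _
  unfold Spec_abcerror abcerror abcerror_alt
  have h1 : (PySem.List.sorted arr1 (fun s : String => s) false).Pairwise (· ≤ ·) := by
    simpa using PySem.List.sorted_pairwise arr1 (fun s => s)
  have h2 : (PySem.List.sorted (number.toList.map (fun c => String.ofList [c]))
      (fun s : String => s) false).Pairwise (· ≤ ·) := by
    simpa using PySem.List.sorted_pairwise (number.toList.map (fun c => String.ofList [c])) (fun s => s)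
  simp only [a_loop_eq_sum, mergeRuns_eq_sum _ _ h1 h2, sum_counts_sorted, zero_add]
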